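-- pv_equiv track=rewrite | github.com/ivi982010/SySdL-TPs | Lexer.py | a_BraClose
-- ===== SOURCE A (Python) =====
-- def a_BraClose (tokens, acu):
--     s = 0
--     for c in acu:
--         if c == '}':
--             s = 1
--         else:
--             s = -1
--     if s == 1:
--         tokens.append(("<BraClose>", acu))
--     return (s == 1)
-- ===== SOURCE B (Python) =====
-- def a_BraClose(tokens, acu):
--     last = bool(acu) and acu[-1] == '}'
--     if last:
--         tokens.append(("<BraClose>", acu))
--     return last
-- ===== Notes on version B (the rewrite author's own statement) =====
-- stated objective: simpler
-- what changed: Replaces the character-by-character scan that tracks a last-seen flag with a direct O(1) test of the final character (acu and acu[-1] == '}').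
import Mathlib
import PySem

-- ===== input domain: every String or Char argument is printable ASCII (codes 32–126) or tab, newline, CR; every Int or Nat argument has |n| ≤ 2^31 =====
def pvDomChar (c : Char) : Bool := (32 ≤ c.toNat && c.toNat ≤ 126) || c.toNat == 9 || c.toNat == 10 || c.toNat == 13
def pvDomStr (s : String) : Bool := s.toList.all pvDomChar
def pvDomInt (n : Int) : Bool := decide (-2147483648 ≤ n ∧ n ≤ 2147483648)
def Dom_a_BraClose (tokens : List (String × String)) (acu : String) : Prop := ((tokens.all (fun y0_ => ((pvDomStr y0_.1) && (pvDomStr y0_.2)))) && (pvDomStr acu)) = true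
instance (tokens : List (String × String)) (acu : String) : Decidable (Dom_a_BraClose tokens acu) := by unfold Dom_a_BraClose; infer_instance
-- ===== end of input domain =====

-- ===== PORT A =====
-- Port of A: fold over acu tracking s ∈ {0,1,-1}; return s == 1. (Both versions also
-- append ("<BraClose>", acu) to tokens when returning True in Python; only the return
-- value is modeled/proved here, and B performs the identical mutation.)
def a_BraClose (tokens : List (String × String)) (acu : String) : Bool :=
  let s : Int := acu.toList.foldl (fun _ c => if c = '}' then (1 : Int) else -1) 0
  s == 1

-- ===== PORT B =====
-- Port of B: O(1) test of the final character.
def a_BraClose_alt (tokens : List (String × String)) (acu : String) : Bool :=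
  acu.toList.getLast? == some '}' 

-- ===== PRECONDITION & SPEC =====
def Spec_a_BraClose (tokens : List (String × String)) (acu : String) (out : Bool) : Prop := out = a_BraClose_alt tokens acu
instance (tokens : List (String × String)) (acu : String) (out : Bool) : Decidable (Spec_a_BraClose tokens acu out) := by unfold Spec_a_BraClose; infer_instance

-- ===== CLAIM (what is proved, stated in full; the proofs are below) =====
def Claim_equal_a_BraClose : Prop := ∀ (tokens : List (String × String)) (acu : String), Dom_a_BraClose tokens acu → Spec_a_BraClose tokens acu (a_BraClose tokens acu)

-- ===== LEMMAS AND PROOFS =====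

-- ===== VERDICT (by name: the statement is the Claim_ definition above) =====
theorem foldl_last (l : List Char) (s0 : Int) :
    l.foldl (fun _ c => if c = '}' then (1 : Int) else -1) s0 =
      match l.getLast? with
      | none => s0
      | some c => if c = '}' then (1 : Int) else -1 := by
  induction l generalizing s0 with
  | nil => rfl
  | cons c l ih =>
    cases l with
    | nil => simp [List.foldl]
    | cons d l => rw [List.foldl_cons]; exact ih _

theorem a_BraClose_spec : Claim_equal_a_BraClose := by
  intro tokens acu _
  unfold Spec_a_BraClose a_BraClose a_BraClose_alt
  rw [foldl_last]
  cases h : acu.toList.getLast? with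
  | none => simp
  | some c =>
    by_cases hc : c = '}' <;> simp [hc]
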